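-- pv_equiv track=rewrite | github.com/Osigelialex/alx-higher_level_programming | 0x05-python-exceptions/0-safe_print_list.py | safe_print_list
-- ===== SOURCE A (Python) =====
-- def safe_print_list(my_list=[], x=0):
--     try:
--         number = ""
--         for element in range(x):
--             number += str(my_list[element])
--         return int(number)
--     except IndexError:
--         number = ""
--         for element in my_list:
--             number += str(element)
--         return int(number)
-- ===== SOURCE B (Python) =====
-- def safe_print_list(my_list=[], x=0):
--     if x < 0:
--         x = 0
--     number = "".join(str(e) for e in my_list[:x])
--     return int(number)
-- ===== Notes on version B (the rewrite author's own statement) =====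
-- stated objective: simpler
-- what changed: Replaces the try/except with an exception-driven full recomputation by a single clamped slice my_list[:max(x,0)] joined and parsed once; no index loop, no IndexError handler.
import Mathlib
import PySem

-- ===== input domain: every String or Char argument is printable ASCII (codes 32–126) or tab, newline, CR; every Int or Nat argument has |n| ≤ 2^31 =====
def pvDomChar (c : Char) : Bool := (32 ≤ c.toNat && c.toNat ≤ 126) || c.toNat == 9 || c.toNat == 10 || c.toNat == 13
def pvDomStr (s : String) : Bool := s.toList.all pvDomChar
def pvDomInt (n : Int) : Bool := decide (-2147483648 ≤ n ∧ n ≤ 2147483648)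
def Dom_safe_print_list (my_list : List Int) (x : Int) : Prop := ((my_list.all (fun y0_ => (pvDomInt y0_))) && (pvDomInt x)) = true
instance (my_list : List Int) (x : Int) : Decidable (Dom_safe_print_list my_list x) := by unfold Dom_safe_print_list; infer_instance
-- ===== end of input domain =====

-- B drops A's try/except and its exception-driven full recomputation: one clamped slice,
-- joined and parsed once (objective: simpler).
-- Strings are carried as List Char; int(s)/str(n) are PySem.Int.ofChars?/toChars (exact).

-- ===== PORT A =====
-- the 'for element in range(x): number += str(my_list[element])' loop of the try block;
-- none = the IndexError that sends A into the except branch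
def pvALoop (l : List Int) : Nat → Nat → List Char → Option (List Char)
  | 0, _, acc => some acc
  | n+1, i, acc =>
    match PySem.List.pyGet? l (i : Int) with
    | none => none
    | some v => pvALoop l n (i+1) (acc ++ PySem.Int.toChars v)

def safe_print_list (my_list : List Int) (x : Int) : Int :=
  match pvALoop my_list x.toNat 0 [] with
  | some number => (PySem.Int.ofChars? number).getD 0   -- int(number); ValueError is outside Pre_
  | none =>  -- except IndexError: concatenate the whole list
    (PySem.Int.ofChars? (my_list.foldl (fun acc e => acc ++ PySem.Int.toChars e) [])).getD 0

-- ===== PORT B =====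
def safe_print_list_alt (my_list : List Int) (x : Int) : Int :=
  let x' : Int := if x < 0 then 0 else x
  let number := ((PySem.List.slice my_list none (some x')).map PySem.Int.toChars).flatten  -- "".join
  (PySem.Int.ofChars? number).getD 0   -- int(number); ValueError is outside Pre_

-- ===== PRECONDITION & SPEC =====
-- Pre_ excludes exactly the inputs where Python A raises ValueError from int(): an empty
-- concatenation (x < 1 or empty list) or a negative element after the first of the taken prefix.
def Pre_safe_print_list (my_list : List Int) (x : Int) : Prop :=
  1 ≤ x ∧ my_list ≠ [] ∧ ∀ e ∈ (my_list.take x.toNat).tail, 0 ≤ e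
instance (my_list : List Int) (x : Int) : Decidable (Pre_safe_print_list my_list x) := by
  unfold Pre_safe_print_list; infer_instance
def pvWitness_safe_print_list : List Int × Int := ([-1, 2, 3], 2)

def Spec_safe_print_list (my_list : List Int) (x : Int) (out : Int) : Prop := out = safe_print_list_alt my_list x
instance (my_list : List Int) (x : Int) (out : Int) : Decidable (Spec_safe_print_list my_list x out) := by unfold Spec_safe_print_list; infer_instance

-- ===== CLAIM (what is proved, stated in full; the proofs are below) =====
def Claim_equal_safe_print_list : Prop := ∀ (my_list : List Int) (x : Int), Dom_safe_print_list my_list x → Pre_safe_print_list my_list x → Spec_safe_print_list my_list x (safe_print_list my_list x)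

-- ===== LEMMAS AND PROOFS =====

lemma pvALoop_eq (l : List Int) (n : Nat) : ∀ (i : Nat) (acc : List Char), i ≤ l.length →
    pvALoop l n i acc =
      if i + n ≤ l.length then some (acc ++ (((l.drop i).take n).map PySem.Int.toChars).flatten)
      else none := by
  induction n with
  | zero => intro i acc h; simp [pvALoop, h]
  | succ n ih =>
    intro i acc h
    rcases lt_or_eq_of_le h with h' | h'
    · have hget : PySem.List.pyGet? l (i : Int) = some l[i] := by
        simp [h']
      simp only [pvALoop, hget]
      rw [ih (i+1) _ (by omega)]
      have hdrop : l.drop i = l[i] :: l.drop (i+1) := (List.getElem_cons_drop h').symm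
      by_cases hle : i + (n+1) ≤ l.length
      · rw [if_pos (by omega), if_pos hle, hdrop]
        simp only [List.map_cons, List.take_succ_cons, List.flatten_cons, List.append_assoc]
      · rw [if_neg (by omega), if_neg hle]
    · have hget : PySem.List.pyGet? l (i : Int) = none := by
        simp [PySem.List.pyGet?_natCast, h']
      simp only [pvALoop, hget]
      rw [if_neg (by omega)]

lemma pvFoldl_concat (l : List Int) : ∀ acc : List Char,
    l.foldl (fun acc e => acc ++ PySem.Int.toChars e) acc = acc ++ (l.map PySem.Int.toChars).flatten := by
  induction l with
  | nil => intro acc; simp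
  | cons a t ih => intro acc; simp [List.foldl_cons, ih]

-- ===== VERDICT (by name: the statement is the Claim_ definition above) =====
theorem safe_print_list_spec : Claim_equal_safe_print_list := by
  intro my_list x _ _
  unfold Spec_safe_print_list safe_print_list safe_print_list_alt
  have hx' : (if x < 0 then (0:Int) else x).toNat = x.toNat := by split <;> omega
  have hslice : PySem.List.slice my_list none (some (if x < 0 then (0:Int) else x))
      = my_list.take x.toNat := by
    rw [PySem.List.slice_to _ (by split <;> omega : (0:Int) ≤ if x < 0 then 0 else x), hx']
  rw [pvALoop_eq my_list x.toNat 0 [] (by omega)]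
  by_cases hle : 0 + x.toNat ≤ my_list.length
  · simp only [if_pos hle, hslice, List.drop_zero, List.nil_append]
  · simp only [if_neg hle, hslice, pvFoldl_concat, List.nil_append,
      List.take_of_length_le (by omega : my_list.length ≤ x.toNat)]
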